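-- pv_equiv track=rewrite | github.com/GeekGames74/Discord-Bots | Modules/inv.py | name_to_alias
-- ===== SOURCE A (Python) =====
-- def name_to_alias(name: str|None, capitalize: bool = False) -> str|None:
--     """Format the item name to a valid alias."""
--     if not name: return None
--     disallow = "*`\"'_~ "
--     for char in disallow:
--         name = name.replace(char, "")
--     if name.isdigit() or not name:
--         return None
--     if capitalize:
--         name = name.strip().capitalize()
--     else:
--         name = name.strip().lower()
--     return name
-- ===== SOURCE B (Python) =====
-- def name_to_alias(name: str | None, capitalize: bool = False) -> str | None:
--     """Format the item name to a valid alias."""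
--     if not name:
--         return None
--     bad = set("*`\"'_~ ")
--     name = ''.join(c for c in name if c not in bad)
--     if not name or name.isdigit():
--         return None
--     name = name.strip()
--     return name.capitalize() if capitalize else name.lower()
-- ===== Notes on version B (the rewrite author's own statement) =====
-- stated objective: simpler
-- what changed: The seven full-string replace passes (one per disallowed character) are collapsed into a single pass over the input that drops characters belonging to a set built once; the guards and final strip/capitalize-or-lower stay.
import Mathlib
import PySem

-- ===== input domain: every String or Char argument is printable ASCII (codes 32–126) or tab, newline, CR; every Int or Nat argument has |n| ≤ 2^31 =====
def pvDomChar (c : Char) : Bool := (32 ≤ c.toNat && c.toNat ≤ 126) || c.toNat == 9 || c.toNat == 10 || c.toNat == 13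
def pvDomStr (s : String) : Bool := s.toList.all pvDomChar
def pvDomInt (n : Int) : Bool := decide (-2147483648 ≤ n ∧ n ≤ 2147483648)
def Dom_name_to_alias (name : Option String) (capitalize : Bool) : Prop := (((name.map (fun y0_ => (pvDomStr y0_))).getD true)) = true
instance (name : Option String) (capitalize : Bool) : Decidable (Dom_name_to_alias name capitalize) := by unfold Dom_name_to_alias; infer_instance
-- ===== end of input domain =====

-- B replaces A's seven per-character replace passes by one filtering pass over the input; same guards and final strip/capitalize-or-lower (objective: simpler).

-- shared hand-port of str.capitalize() (not in PySem): first char uppercased, rest lowercased — exact on the ASCII domain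
def pyCapitalize (s : String) : String :=
  match s.toList with
  | [] => ""
  | c :: t => String.ofList (PySem.Chars.upperChar c :: PySem.Chars.lower t)

-- ===== PORT A =====
def name_to_alias (name : Option String) (capitalize : Bool) : Option String :=
  match name with
  | none => none
  | some n0 =>
    if n0 = "" then none
    else
      let disallow := "*`\"'_~ "
      let n := disallow.toList.foldl (fun s c => PySem.Str.replace s (String.ofList [c]) "") n0
      if PySem.Str.strIsdigit n || n = "" then none
      else if capitalize then some (pyCapitalize (PySem.Str.strip n))
      else some (PySem.Str.lower (PySem.Str.strip n))

-- ===== PORT B =====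
def name_to_alias_alt (name : Option String) (capitalize : Bool) : Option String :=
  match name with
  | none => none
  | some s =>
    if s = "" then none
    else
      let bad : PySem.Set Char := PySem.Set.ofList "*`\"'_~ ".toList
      let filtered := String.ofList (s.toList.filter (fun c => !(bad.contains c)))
      if filtered = "" || PySem.Str.strIsdigit filtered then none
      else
        let t := PySem.Str.strip filtered
        if capitalize then some (pyCapitalize t) else some (PySem.Str.lower t)

-- ===== PRECONDITION & SPEC =====
def Spec_name_to_alias (name : Option String) (capitalize : Bool) (out : Option String) : Prop := out = name_to_alias_alt name capitalize
instance (name : Option String) (capitalize : Bool) (out : Option String) : Decidable (Spec_name_to_alias name capitalize out) := by unfold Spec_name_to_alias; infer_instance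

-- ===== CLAIM (what is proved, stated in full; the proofs are below) =====
def Claim_equal_name_to_alias : Prop := ∀ (name : Option String) (capitalize : Bool), Dom_name_to_alias name capitalize → Spec_name_to_alias name capitalize (name_to_alias name capitalize)

-- ===== LEMMAS AND PROOFS =====

-- replace.go with a one-character pattern and empty replacement removes that character
theorem replace_go_single (c : Char) : ∀ (fuel : Nat) (l acc : List Char), l.length ≤ fuel →
    PySem.Chars.replace.go [c] [] fuel l acc = acc.reverse ++ l.filter (fun x => x != c) := by
  intro fuel
  induction fuel with
  | zero =>
    intro l acc h
    have : l = [] := List.eq_nil_of_length_eq_zero (Nat.le_zero.mp h)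
    subst this
    simp [PySem.Chars.replace.go]
  | succ m ih =>
    intro l acc h
    cases l with
    | nil => simp [PySem.Chars.replace.go]
    | cons x t =>
      have ht : t.length ≤ m := Nat.lt_succ_iff.mp (by simpa using h)
      by_cases hx : x = c
      · subst hx
        rw [show PySem.Chars.replace.go [x] [] (m+1) (x::t) acc
              = PySem.Chars.replace.go [x] [] m t acc from by
            simp [PySem.Chars.replace.go, List.isPrefixOf]]
        rw [ih t acc ht]
        simp [List.filter]
      · have hb : (x == c) = false := by simp [hx]
        rw [show PySem.Chars.replace.go [c] [] (m+1) (x::t) acc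
              = PySem.Chars.replace.go [c] [] m t (x::acc) from by
            simp [PySem.Chars.replace.go, List.isPrefixOf, Ne.symm hx]]
        rw [ih t (x :: acc) ht]
        simp [List.filter, bne, hb]

theorem replace_single (c : Char) (s : List Char) :
    PySem.Chars.replace s [c] [] = s.filter (fun x => x != c) := by
  simp only [PySem.Chars.replace, List.isEmpty_cons, Bool.false_eq_true, if_false]
  simpa using replace_go_single c s.length s [] (le_refl _)

theorem str_replace_single (c : Char) (s : String) :
    PySem.Str.replace s (String.ofList [c]) "" = String.ofList (s.toList.filter (fun x => x != c)) := by
  have h1 : (String.ofList [c]).toList = [c] := String.toList_ofList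
  have h2 : ("" : String).toList = [] := rfl
  simp only [PySem.Str.replace, h1, h2, replace_single]

-- the conjunction of the seven per-character tests is B's set non-membership test
theorem keep_pred_eq (x : Char) :
    (x != ' ' && (x != '~' && (x != '_' && (x != '\'' && (x != '"' && (x != '`' && x != '*'))))))
      = !PySem.Set.contains ['*', '`', '"', '\'', '_', '~', ' '] x := by
  simp only [PySem.Set.contains, List.contains_cons, List.contains_nil, Bool.or_false, bne]
  cases h1 : x == '*' <;> cases h2 : x == '`' <;> cases h3 : x == '"' <;>
    cases h4 : x == '\'' <;> cases h5 : x == '_' <;> cases h6 : x == '~' <;>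
    cases h7 : x == ' ' <;> simp [h1, h2, h3, h4, h5, h6, h7]

-- the seven-replace fold equals B's one-pass filter, as strings
theorem fold_replace_eq_filter (s : String) :
    ("*`\"'_~ ".toList.foldl (fun t c => PySem.Str.replace t (String.ofList [c]) "") s)
      = String.ofList (s.toList.filter
          (fun c => !((PySem.Set.ofList "*`\"'_~ ".toList : PySem.Set Char).contains c))) := by
  show PySem.Str.replace (PySem.Str.replace (PySem.Str.replace (PySem.Str.replace
        (PySem.Str.replace (PySem.Str.replace (PySem.Str.replace s
          (String.ofList ['*']) "") (String.ofList ['`']) "") (String.ofList ['"']) "")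
          (String.ofList ['\'']) "") (String.ofList ['_']) "") (String.ofList ['~']) "")
          (String.ofList [' ']) "" = _
  simp only [str_replace_single, String.toList_ofList, List.filter_filter]
  apply congrArg String.ofList
  refine List.filter_congr ?_
  intro x _
  rw [show (PySem.Set.ofList "*`\"'_~ ".toList : PySem.Set Char)
      = ['*', '`', '"', '\'', '_', '~', ' '] from by decide]
  exact keep_pred_eq x

-- ===== VERDICT (by name: the statement is the Claim_ definition above) =====
theorem name_to_alias_spec : Claim_equal_name_to_alias := by
  intro name capitalize _
  unfold Spec_name_to_alias
  cases name with
  | none => rfl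
  | some s =>
    simp only [name_to_alias, name_to_alias_alt]
    by_cases hs : s = ""
    · simp [hs]
    · simp only [hs, if_false]
      rw [fold_replace_eq_filter]
      rw [Bool.or_comm]
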